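-- pv_equiv track=rewrite | github.com/KenyMaldonado/SistemaConjuntos | SISTEMACONJUNTOS/src/logic/agrupador.py | agrupar_conjuntos
-- ===== SOURCE A (Python) =====
-- def agrupar_conjuntos(conjuntos):
--     num_conjuntos = len(conjuntos)
--     grupos = []
--
--     # Agrupación según la cantidad de conjuntos
--     while num_conjuntos > 0:
--         if num_conjuntos >= 8:
--             grupos.append(4)  # Grupos de 4
--             num_conjuntos -= 4
--         elif num_conjuntos == 7:
--             grupos.append(4)
--             grupos.append(3)
--             break
--         elif num_conjuntos == 6:
--             grupos.append(3)
--             grupos.append(3)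
--             break
--         elif num_conjuntos == 5:
--             grupos.append(3)
--             grupos.append(2)
--             break
--         else:
--             grupos.append(num_conjuntos)
--             break
--     return grupos
-- ===== SOURCE B (Python) =====
-- def agrupar_conjuntos(conjuntos):
--     n = len(conjuntos)
--     if n == 0:
--         return []
--     if n <= 4:
--         return [n]
--     r = n % 4
--     if r == 0:
--         return [4] * (n // 4)
--     if r == 1:
--         return [4] * ((n - 5) // 4) + [3, 2]
--     if r == 2:
--         return [4] * ((n - 6) // 4) + [3, 3]
--     return [4] * ((n - 7) // 4) + [4, 3]
-- ===== Notes on version B (the rewrite author's own statement) =====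
-- stated objective: simpler
-- what changed: Replaces the decrementing while-loop with a closed-form computation: branch on n % 4 and build the result by list replication plus a fixed two-element tail.
import Mathlib
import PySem

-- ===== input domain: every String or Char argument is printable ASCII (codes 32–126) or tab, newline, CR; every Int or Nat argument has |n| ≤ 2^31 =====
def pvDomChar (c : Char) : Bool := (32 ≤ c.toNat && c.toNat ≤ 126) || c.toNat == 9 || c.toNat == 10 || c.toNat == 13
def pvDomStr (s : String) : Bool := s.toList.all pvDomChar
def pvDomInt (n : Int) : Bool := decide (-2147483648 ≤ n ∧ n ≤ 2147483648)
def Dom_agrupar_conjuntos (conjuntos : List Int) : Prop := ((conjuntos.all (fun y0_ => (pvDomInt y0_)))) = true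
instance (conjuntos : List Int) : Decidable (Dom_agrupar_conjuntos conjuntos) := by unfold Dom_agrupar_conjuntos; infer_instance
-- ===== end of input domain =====

-- B replaces A's decrementing while-loop by a closed-form branch on n % 4 building
-- the list with replication plus a fixed tail (objective: simpler).

-- ===== PORT A =====
-- the while-loop of A, recursing on num_conjuntos (decremented by 4 in the n ≥ 8 branch)
def agrupar_loopA (n : Nat) : List Int :=
  if n = 0 then []
  else if n ≥ 8 then (4 : Int) :: agrupar_loopA (n - 4)
  else if n = 7 then [4, 3]
  else if n = 6 then [3, 3]
  else if n = 5 then [3, 2]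
  else [(n : Int)]

def agrupar_conjuntos (conjuntos : List Int) : List Int :=
  agrupar_loopA conjuntos.length

-- ===== PORT B =====
def agrupar_altN (n : Nat) : List Int :=
  if n = 0 then []
  else if n ≤ 4 then [(n : Int)]
  else if n % 4 = 0 then List.replicate (n / 4) (4 : Int)
  else if n % 4 = 1 then List.replicate ((n - 5) / 4) (4 : Int) ++ [3, 2]
  else if n % 4 = 2 then List.replicate ((n - 6) / 4) (4 : Int) ++ [3, 3]
  else List.replicate ((n - 7) / 4) (4 : Int) ++ [4, 3]

def agrupar_conjuntos_alt (conjuntos : List Int) : List Int :=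
  agrupar_altN conjuntos.length

-- ===== PRECONDITION & SPEC =====
def Spec_agrupar_conjuntos (conjuntos : List Int) (out : List Int) : Prop := out = agrupar_conjuntos_alt conjuntos
instance (conjuntos : List Int) (out : List Int) : Decidable (Spec_agrupar_conjuntos conjuntos out) := by unfold Spec_agrupar_conjuntos; infer_instance

-- ===== CLAIM (what is proved, stated in full; the proofs are below) =====
def Claim_equal_agrupar_conjuntos : Prop := ∀ (conjuntos : List Int), Dom_agrupar_conjuntos conjuntos → Spec_agrupar_conjuntos conjuntos (agrupar_conjuntos conjuntos)

-- ===== LEMMAS AND PROOFS =====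

-- ===== VERDICT (by name: the statement is the Claim_ definition above) =====
lemma agrupar_altN_step (n : Nat) (h : 12 ≤ n) :
    agrupar_altN n = (4 : Int) :: agrupar_altN (n - 4) := by
  unfold agrupar_altN
  split_ifs <;> try omega
  · rw [show n / 4 = (n - 4) / 4 + 1 by omega, List.replicate_succ]
  · rw [show (n - 5) / 4 = (n - 4 - 5) / 4 + 1 by omega, List.replicate_succ, List.cons_append]
  · rw [show (n - 6) / 4 = (n - 4 - 6) / 4 + 1 by omega, List.replicate_succ, List.cons_append]
  · rw [show (n - 7) / 4 = (n - 4 - 7) / 4 + 1 by omega, List.replicate_succ, List.cons_append]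

lemma agrupar_eqN (n : Nat) : agrupar_loopA n = agrupar_altN n := by
  induction n using Nat.strong_induction_on with
  | _ n ih =>
    by_cases h : 12 ≤ n
    · rw [agrupar_altN_step n h, agrupar_loopA, if_neg (by omega), if_pos (by omega),
        ih (n - 4) (by omega)]
    · interval_cases n <;> simp [agrupar_loopA, agrupar_altN]

theorem agrupar_conjuntos_spec : Claim_equal_agrupar_conjuntos := by
  intro conjuntos _
  unfold Spec_agrupar_conjuntos agrupar_conjuntos agrupar_conjuntos_alt
  exact agrupar_eqN conjuntos.length
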